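-- pv_equiv track=rewrite | github.com/balakuntlaJayanth/Fastq_scripts | assemstats3.py | trimLens
-- ===== SOURCE A (Python) =====
-- def trimLens(lens, minLen):
--    '''
--    Eliminates any reads below a certain threshold.  Function assumes that input
--    list lens is sorted smallest to largest.
--    '''
--
--    index = 0
--
--    for i in range(len(lens)):
--       if lens[i] < minLen:
--          index += 1
--       else:
--          break
--
--    return lens[index:len(lens)]
-- ===== SOURCE B (Python) =====
-- def trimLens(lens, minLen):
--    '''
--    Eliminates any reads below a certain threshold.  Function assumes that input
--    list lens is sorted smallest to largest.  Binary search for the first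
--    element >= minLen instead of a linear front scan.
--    '''
--    lo = 0
--    hi = len(lens)
--    while lo < hi:
--       mid = (lo + hi) // 2
--       if lens[mid] < minLen:
--          lo = mid + 1
--       else:
--          hi = mid
--    return lens[lo:]
-- ===== Notes on version B (the rewrite author's own statement) =====
-- stated objective: alternative
-- what changed: Replaces the linear front-to-back scan for the first element >= minLen with a hand-written binary search (bisect_left) over the list, relying on the documented sorted precondition, then slices once.
-- outside the precondition, e.g. on trimLens([5, 1, 3], 2): A returns [5, 1, 3], B returns [3]
import Mathlib
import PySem

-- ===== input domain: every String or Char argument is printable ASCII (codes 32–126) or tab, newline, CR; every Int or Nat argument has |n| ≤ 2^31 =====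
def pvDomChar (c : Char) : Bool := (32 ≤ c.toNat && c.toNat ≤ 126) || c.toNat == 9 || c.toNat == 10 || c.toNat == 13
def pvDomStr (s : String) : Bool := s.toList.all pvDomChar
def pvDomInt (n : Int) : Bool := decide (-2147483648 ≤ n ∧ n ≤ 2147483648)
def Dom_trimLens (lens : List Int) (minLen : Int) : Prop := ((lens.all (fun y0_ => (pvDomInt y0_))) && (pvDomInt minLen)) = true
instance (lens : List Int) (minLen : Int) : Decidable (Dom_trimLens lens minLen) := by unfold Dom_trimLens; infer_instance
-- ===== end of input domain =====

-- B replaces A's linear front scan with a binary search (bisect_left) for the first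
-- element ≥ minLen, using the function's documented sorted-ascending precondition.

-- ===== PORT A =====
-- the 'for i in range(len(lens)): if lens[i] < minLen: index += 1 else: break' loop
def trimLensLoop (lens : List Int) (minLen : Int) : List Int → Int → Int
  | [], index => index
  | i :: rest, index =>
      match PySem.List.pyGet? lens i with
      | some v => if v < minLen then trimLensLoop lens minLen rest (index + 1) else index
      | none => index  -- unreachable: i is drawn from range(len(lens))

def trimLens (lens : List Int) (minLen : Int) : List Int :=
  PySem.List.slice lens
    (some (trimLensLoop lens minLen (PySem.List.pyRange 0 (lens.length : Int) 1) 0))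
    (some (lens.length : Int))

-- ===== PORT B =====
-- the 'while lo < hi' bisect_left loop of Source B
def bisectLoop (lens : List Int) (minLen : Int) (lo hi : Int) : Int :=
  if h : lo < hi then
    let mid := PySem.Int.floordiv (lo + hi) 2
    match PySem.List.pyGet? lens mid with
    | some v =>
        if v < minLen then bisectLoop lens minLen (mid + 1) hi
        else bisectLoop lens minLen lo mid
    | none => lo  -- unreachable under the loop invariant 0 ≤ lo ≤ hi ≤ len(lens)
  else lo
  termination_by (hi - lo).toNat
  decreasing_by
  · have hb := PySem.Int.floordiv_two_mid_bounds (le_of_lt h)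
    have hlt : PySem.Int.floordiv (lo + hi) 2 < hi := by
      rw [PySem.Int.floordiv_lt_iff_lt_mul (by omega)]; omega
    omega
  · have hb := PySem.Int.floordiv_two_mid_bounds (le_of_lt h)
    have hlt : PySem.Int.floordiv (lo + hi) 2 < hi := by
      rw [PySem.Int.floordiv_lt_iff_lt_mul (by omega)]; omega
    omega

def trimLens_alt (lens : List Int) (minLen : Int) : List Int :=
  PySem.List.slice lens (some (bisectLoop lens minLen 0 (lens.length : Int))) none

-- ===== PRECONDITION & SPEC =====
-- Pre_ requires that the elements < minLen form a prefix of the list (a condition the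
-- sorted-ascending order demanded by A's own docstring implies); on lists violating it the
-- documented precondition is broken and A's prefix scan and B's binary search return
-- different accidental values, neither of which is specified.
def Pre_trimLens (lens : List Int) (minLen : Int) : Prop :=
  lens.Pairwise (fun a b => a < minLen ∨ minLen ≤ b)
instance (lens : List Int) (minLen : Int) : Decidable (Pre_trimLens lens minLen) := by
  unfold Pre_trimLens; infer_instance

def pvWitness_trimLens : List Int × Int := ([1, 3, 5], 4)

def Spec_trimLens (lens : List Int) (minLen : Int) (out : List Int) : Prop := out = trimLens_alt lens minLen
instance (lens : List Int) (minLen : Int) (out : List Int) : Decidable (Spec_trimLens lens minLen out) := by unfold Spec_trimLens; infer_instance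

-- ===== CLAIM (what is proved, stated in full; the proofs are below) =====
def Claim_equal_trimLens : Prop := ∀ (lens : List Int) (minLen : Int), Dom_trimLens lens minLen → Pre_trimLens lens minLen → Spec_trimLens lens minLen (trimLens lens minLen)

-- ===== LEMMAS AND PROOFS =====

theorem takeWhile_len_le (p : Int → Bool) (l : List Int) :
    (l.takeWhile p).length ≤ l.length := by
  induction l with
  | nil => simp
  | cons x xs ih =>
      simp only [List.takeWhile]
      cases p x <;> simp <;> omega

-- A's loop counts the length of the maximal '< minLen' prefix.
theorem trimLensLoop_count (lens : List Int) (minLen : Int) :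
    ∀ j : Nat, j ≤ lens.length → ∀ c : Int,
      trimLensLoop lens minLen (PySem.List.pyRange (j : Int) (lens.length : Int) 1) c
        = c + (((lens.drop j).takeWhile (fun v => v < minLen)).length : Int) := by
  have main : ∀ d j : Nat, lens.length - j = d → j ≤ lens.length → ∀ c : Int,
      trimLensLoop lens minLen (PySem.List.pyRange (j : Int) (lens.length : Int) 1) c
        = c + (((lens.drop j).takeWhile (fun v => v < minLen)).length : Int) := by
    intro d
    induction d with
    | zero =>
        intro j hd hj c
        have hje : j = lens.length := by omega
        subst hje
        rw [PySem.List.pyRange_one_eq_nil le_rfl]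
        simp [trimLensLoop, List.drop_eq_nil_of_le le_rfl]
    | succ d ih =>
        intro j hd hj c
        have hjlt : j < lens.length := by omega
        rw [PySem.List.pyRange_one_cons (by exact_mod_cast hjlt)]
        have hget : PySem.List.pyGet? lens (j : Int) = some (lens[j]'hjlt) := by
          rw [PySem.List.pyGet?_natCast]
          exact List.getElem?_eq_getElem hjlt
        have hdrop : lens.drop j = lens[j]'hjlt :: lens.drop (j + 1) :=
          List.drop_eq_getElem_cons hjlt
        by_cases hv : lens[j]'hjlt < minLen
        · simp only [trimLensLoop, hget, if_pos hv]
          have hcast : (j : Int) + 1 = ((j + 1 : Nat) : Int) := by push_cast; ring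
          rw [hcast, ih (j + 1) (by omega) (by omega) (c + 1)]
          rw [hdrop]
          simp only [List.takeWhile_cons, hv, decide_true]
          push_cast [List.length_cons]
          omega
        · simp only [trimLensLoop, hget, if_neg hv]
          rw [hdrop]
          simp only [List.takeWhile_cons, hv, decide_false]
          simp
  intro j hj c
  exact main (lens.length - j) j rfl hj c

theorem takeWhile_getElem_true (p : Int → Bool) (l : List Int) :
    ∀ i (hi : i < (l.takeWhile p).length) (hl : i < l.length), p (l[i]) = true := by
  induction l with
  | nil => simp
  | cons x xs ih =>
      intro i hi hl
      by_cases hp : p x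
      · cases i with
        | zero => simpa using hp
        | succ n =>
            simp only [List.takeWhile_cons, hp, if_true, List.length_cons] at hi
            simpa using ih n (by simpa using hi) (by simpa using hl)
      · simp [hp] at hi

theorem takeWhile_getElem_false (p : Int → Bool) (l : List Int)
    (h : (l.takeWhile p).length < l.length) : p (l[(l.takeWhile p).length]) = false := by
  induction l with
  | nil => simp at h
  | cons x xs ih =>
      by_cases hp : p x
      · have := ih
        simp only [List.takeWhile_cons, hp, if_true, List.length_cons] at h ⊢
        exact ih (by omega)
      · simpa [List.takeWhile_cons, hp] using hp

-- B's bisect loop converges to that same prefix length on a sorted list.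
theorem bisectLoop_count (lens : List Int) (minLen : Int)
    (hs : lens.Pairwise (fun a b => a < minLen ∨ minLen ≤ b)) :
    ∀ d lo hi : Nat, hi - lo = d →
      lo ≤ ((lens.takeWhile (fun v => v < minLen)).length) →
      ((lens.takeWhile (fun v => v < minLen)).length) ≤ hi →
      hi ≤ lens.length →
      bisectLoop lens minLen (lo : Int) (hi : Int)
        = (((lens.takeWhile (fun v => v < minLen)).length : Nat) : Int) := by
  set k := (lens.takeWhile (fun v => v < minLen)).length with hkdef
  have hklen : k ≤ lens.length := takeWhile_len_le _ _
  have hlt : ∀ i (h : i < lens.length), i < k → lens[i] < minLen := by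
    intro i h hik
    have := takeWhile_getElem_true (fun v => decide (v < minLen)) lens i hik h
    simpa using this
  have hge : ∀ i (h : i < lens.length), k ≤ i → ¬ lens[i] < minLen := by
    intro i h hki
    have hkl : k < lens.length := by omega
    have hk0 : ¬ lens[k] < minLen := by
      have := takeWhile_getElem_false (fun v => decide (v < minLen)) lens hkl
      simpa using this
    rcases Nat.eq_or_lt_of_le hki with he | hlt'
    · simpa [he] using hk0
    · rcases (List.pairwise_iff_getElem.mp hs) k i hkl h hlt' with hc | hc
      · exact absurd hc hk0
      · omega
  intro d
  induction d using Nat.strong_induction_on with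
  | _ d ih =>
    intro lo hi hd hlo hhi hlen
    rw [bisectLoop]
    by_cases hlh : (lo : Int) < (hi : Int)
    · rw [dif_pos hlh]
      have hcast : (lo : Int) + (hi : Int) = ((lo + hi : Nat) : Int) := by push_cast; ring
      have hmid : PySem.Int.floordiv ((lo : Int) + (hi : Int)) 2
          = (((lo + hi) / 2 : Nat) : Int) := by
        rw [hcast]
        exact_mod_cast PySem.Int.floordiv_natCast (lo + hi) 2
      have hlohi : lo < hi := by exact_mod_cast hlh
      have hm1 : lo ≤ (lo + hi) / 2 := by omega
      have hm2 : (lo + hi) / 2 < hi := by omega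
      have hmlen : (lo + hi) / 2 < lens.length := by omega
      have hget : PySem.List.pyGet? lens (PySem.Int.floordiv ((lo : Int) + (hi : Int)) 2)
          = some (lens[(lo + hi) / 2]'hmlen) := by
        rw [hmid, PySem.List.pyGet?_natCast]
        exact List.getElem?_eq_getElem hmlen
      simp only [hget]
      by_cases hv : lens[(lo + hi) / 2]'hmlen < minLen
      · rw [if_pos hv]
        have hmk : (lo + hi) / 2 < k := by
          by_contra hc
          exact hge _ hmlen (by omega) hv
        have hc1 : PySem.Int.floordiv ((lo : Int) + (hi : Int)) 2 + 1
            = (((lo + hi) / 2 + 1 : Nat) : Int) := by rw [hmid]; push_cast; ring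
        rw [hc1]
        exact ih (hi - ((lo + hi) / 2 + 1)) (by omega) _ hi rfl (by omega) hhi hlen
      · rw [if_neg hv]
        have hmk : k ≤ (lo + hi) / 2 := by
          by_contra hc
          exact hv (hlt _ hmlen (by omega))
        rw [hmid]
        exact ih ((lo + hi) / 2 - lo) (by omega) lo _ rfl hlo (by omega) (by omega)
    · rw [dif_neg hlh]
      have : lo = hi := by
        have : ¬ lo < hi := by exact_mod_cast hlh
        omega
      have hke : k = lo := by omega
      exact_mod_cast hke.symm

-- ===== VERDICT (by name: the statement is the Claim_ definition above) =====
theorem trimLens_spec : Claim_equal_trimLens := by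
  intro lens minLen _ hpre
  unfold Spec_trimLens trimLens trimLens_alt
  have hk := takeWhile_len_le (fun v => v < minLen) lens
  have hA := trimLensLoop_count lens minLen 0 (Nat.zero_le _) 0
  have hB := bisectLoop_count lens minLen hpre (lens.length - 0) 0 lens.length rfl
      (Nat.zero_le _) hk le_rfl
  simp only [Nat.cast_zero, List.drop_zero, zero_add] at hA hB
  rw [hA, hB, PySem.List.slice_natCast, PySem.List.slice_from_natCast]
  exact List.take_of_length_le (by simp)
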